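-- pv_equiv track=rewrite | github.com/v1shay/ml-labs | scripts/ml_labs_runner.py | parse_feature_name
-- ===== SOURCE A (Python) =====
-- def parse_feature_name(raw_feature_name: str, categorical_columns: list[str]) -> dict[str, str]:
--     if raw_feature_name.startswith("num__"):
--         feature_name = raw_feature_name.replace("num__", "", 1)
--         return {"display": feature_name, "source": feature_name}
--
--     if raw_feature_name.startswith("cat__"):
--         remainder = raw_feature_name.replace("cat__", "", 1)
--         for column in sorted(categorical_columns, key=len, reverse=True):
--             prefix = f"{column}_"
--             if remainder.startswith(prefix):
--                 option = remainder.replace(prefix, "", 1)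
--                 return {
--                     "display": f"{column}={option}",
--                     "source": column,
--                 }
--
--         return {"display": remainder.replace("_", " "), "source": remainder.split("_")[0]}
--
--     return {"display": raw_feature_name, "source": raw_feature_name}
-- ===== SOURCE B (Python) =====
-- def parse_feature_name(raw_feature_name: str, categorical_columns: list[str]) -> dict[str, str]:
--     if raw_feature_name.startswith("num__"):
--         feature_name = raw_feature_name[5:]
--         return {"display": feature_name, "source": feature_name}
--
--     if raw_feature_name.startswith("cat__"):
--         remainder = raw_feature_name[5:]
--         candidates = [c for c in categorical_columns if remainder.startswith(c + "_")]
--         if candidates: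
--             column = max(candidates, key=len)
--             option = remainder[len(column) + 1:]
--             return {"display": f"{column}={option}", "source": column}
--         return {"display": remainder.replace("_", " "), "source": remainder.split("_")[0]}
--
--     return {"display": raw_feature_name, "source": raw_feature_name}
-- ===== Notes on version B (the rewrite author's own statement) =====
-- stated objective: simpler
-- what changed: The cat__ branch no longer sorts the columns by length and scans for the first match: it filters the matching candidates in one pass and takes the longest with max(key=len) (distinct equal-length prefixes of the same remainder are impossible, so the choice agrees with A's stable sort-then-scan); prefix stripping is done by slicing instead of replace(...,1).
import Mathlib
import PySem

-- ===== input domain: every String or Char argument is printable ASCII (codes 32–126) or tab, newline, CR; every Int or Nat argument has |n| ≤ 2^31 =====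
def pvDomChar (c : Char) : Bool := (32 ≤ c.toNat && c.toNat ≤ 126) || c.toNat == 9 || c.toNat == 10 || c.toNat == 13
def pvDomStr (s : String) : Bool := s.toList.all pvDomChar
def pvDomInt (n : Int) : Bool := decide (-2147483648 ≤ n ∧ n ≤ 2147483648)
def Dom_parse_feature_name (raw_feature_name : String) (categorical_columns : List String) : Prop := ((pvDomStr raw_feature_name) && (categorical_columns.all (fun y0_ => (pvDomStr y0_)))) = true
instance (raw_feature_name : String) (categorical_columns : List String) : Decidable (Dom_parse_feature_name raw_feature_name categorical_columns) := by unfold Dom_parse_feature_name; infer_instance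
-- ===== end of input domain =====

-- B replaces A's sort-by-length-then-first-match cat__ scan by filter-then-max(key=len) and
-- strips prefixes by slicing instead of replace(...,1): simpler, no sort.

-- ===== PORT A =====
-- exact port of Python s.replace(old, new, 1): splice out the first occurrence (find = -1 means absent)
def pvReplaceFirst (s old new : List Char) : List Char :=
  let i := PySem.Chars.find s old
  if i = -1 then s else s.take i.toNat ++ new ++ s.drop (i.toNat + old.length)

-- the for-loop of A's cat__ branch (falls through to the fallback dict);
-- remainder.split("_") is never empty, so Python's [0] is the head (headI)
def pvCatLoop (rem : List Char) : List String → List (String × String)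
  | [] => [("display", String.ofList (PySem.Chars.replace rem ['_'] [' '])),
           ("source", String.ofList ((PySem.Chars.splitOn rem ['_']).headI))]
  | c :: rest =>
      if PySem.Chars.startswith rem (c.toList ++ ['_']) then
        [("display", String.ofList (c.toList ++ '=' :: pvReplaceFirst rem (c.toList ++ ['_']) [])),
         ("source", c)]
      else pvCatLoop rem rest

def parse_feature_name (raw_feature_name : String) (categorical_columns : List String) : List (String × String) :=
  if PySem.Str.startswith raw_feature_name "num__" then
    let f := pvReplaceFirst raw_feature_name.toList "num__".toList []
    [("display", String.ofList f), ("source", String.ofList f)]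
  else if PySem.Str.startswith raw_feature_name "cat__" then
    pvCatLoop (pvReplaceFirst raw_feature_name.toList "cat__".toList [])
      (PySem.List.sorted categorical_columns (fun c => c.toList.length) true)
  else [("display", raw_feature_name), ("source", raw_feature_name)]

-- ===== PORT B =====
def parse_feature_name_alt (raw_feature_name : String) (categorical_columns : List String) : List (String × String) :=
  if PySem.Str.startswith raw_feature_name "num__" then
    let f := PySem.List.slice raw_feature_name.toList (some 5) none
    [("display", String.ofList f), ("source", String.ofList f)]
  else if PySem.Str.startswith raw_feature_name "cat__" then
    let rem := PySem.List.slice raw_feature_name.toList (some 5) none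
    let candidates := categorical_columns.filter (fun c => PySem.Chars.startswith rem (c.toList ++ ['_']))
    match PySem.List.max? candidates (fun c => c.toList.length) with
    | some column =>
        [("display", String.ofList (column.toList ++ '=' ::
            PySem.List.slice rem (some ((column.toList.length : Int) + 1)) none)),
         ("source", column)]
    | none =>
        [("display", String.ofList (PySem.Chars.replace rem ['_'] [' '])),
         ("source", String.ofList ((PySem.Chars.splitOn rem ['_']).headI))]
  else [("display", raw_feature_name), ("source", raw_feature_name)]

-- ===== PRECONDITION & SPEC =====
def Spec_parse_feature_name (raw_feature_name : String) (categorical_columns : List String) (out : List (String × String)) : Prop := out = parse_feature_name_alt raw_feature_name categorical_columns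
instance (raw_feature_name : String) (categorical_columns : List String) (out : List (String × String)) : Decidable (Spec_parse_feature_name raw_feature_name categorical_columns out) := by unfold Spec_parse_feature_name; infer_instance

-- ===== CLAIM (what is proved, stated in full; the proofs are below) =====
def Claim_equal_parse_feature_name : Prop := ∀ (raw_feature_name : String) (categorical_columns : List String), Dom_parse_feature_name raw_feature_name categorical_columns → Spec_parse_feature_name raw_feature_name categorical_columns (parse_feature_name raw_feature_name categorical_columns)

-- ===== LEMMAS AND PROOFS =====

-- a prefix's first occurrence is at index 0, so replace(old, "", 1) just drops it
lemma pvReplaceFirst_of_prefix (s old : List Char) (h : old <+: s) :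
    pvReplaceFirst s old [] = s.drop old.length := by
  have hfind : PySem.Chars.find s old = 0 := by
    have hnn : 0 ≤ PySem.Chars.find s old := (PySem.Chars.find_nonneg_iff s old).2 h.isInfix
    have hspec := PySem.Chars.find_spec hnn
    rcases Nat.eq_zero_or_pos (PySem.Chars.find s old).toNat with h0 | h0
    · omega
    · exact absurd (by simpa using h) (hspec.2 0 h0)
  simp [pvReplaceFirst, hfind]

-- two columns whose '_'-extended forms both prefix the remainder and have equal length are equal
lemma pvCol_eq {rem : List Char} {c d : String}
    (hc : (c.toList ++ ['_']) <+: rem) (hd : (d.toList ++ ['_']) <+: rem)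
    (hl : c.toList.length = d.toList.length) : c = d := by
  have h1 : (c.toList ++ ['_']) <+: (d.toList ++ ['_']) :=
    List.prefix_of_prefix_length_le hc hd (by simp [hl])
  have h2 : c.toList ++ ['_'] = d.toList ++ ['_'] := h1.eq_of_length (by simp [hl])
  have h3 : c.toList = d.toList := by simpa using h2
  have := congrArg String.ofList h3
  simpa using this

-- A's loop is first-match over the list
lemma pvCatLoop_find? (rem : List Char) (l : List String) :
    pvCatLoop rem l =
      match l.find? (fun c => PySem.Chars.startswith rem (c.toList ++ ['_'])) with
      | some m => [("display", String.ofList (m.toList ++ '=' :: pvReplaceFirst rem (m.toList ++ ['_']) [])),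
                   ("source", m)]
      | none => [("display", String.ofList (PySem.Chars.replace rem ['_'] [' '])),
                 ("source", String.ofList ((PySem.Chars.splitOn rem ['_']).headI))] := by
  induction l with
  | nil => rfl
  | cons c rest ih =>
    by_cases hc : PySem.Chars.startswith rem (c.toList ++ ['_']) = true
    · simp [pvCatLoop, List.find?, hc]
    · simp only [pvCatLoop, List.find?, hc, if_neg, Bool.false_eq_true, not_false_iff]
      simpa [hc] using ih

-- the heart: first match in the length-descending sort = max-by-length of the filtered candidates
lemma pvPick_eq (rem : List Char) (cols : List String) :
    pvCatLoop rem (PySem.List.sorted cols (fun c => c.toList.length) true) =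
      match PySem.List.max? (cols.filter (fun c => PySem.Chars.startswith rem (c.toList ++ ['_'])))
              (fun c => c.toList.length) with
      | some column =>
          [("display", String.ofList (column.toList ++ '=' ::
              PySem.List.slice rem (some ((column.toList.length : Int) + 1)) none)),
           ("source", column)]
      | none => [("display", String.ofList (PySem.Chars.replace rem ['_'] [' '])),
                 ("source", String.ofList ((PySem.Chars.splitOn rem ['_']).headI))] := by
  set p : String → Bool := fun c => PySem.Chars.startswith rem (c.toList ++ ['_']) with hp
  set key : String → Nat := fun c => c.toList.length with hkey
  set sl := PySem.List.sorted cols key true with hsl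
  rw [pvCatLoop_find?]
  rcases hfind : sl.find? p with _ | m
  · -- no match anywhere
    have hnone : ∀ c ∈ cols, ¬ p c = true := by
      intro c hcm
      exact List.find?_eq_none.1 hfind c ((PySem.List.mem_sorted _ _ _ _).2 hcm)
    have hfilter : cols.filter p = [] := List.filter_eq_nil_iff.2 hnone
    rw [hfilter]
    rfl
  · -- first match m in the sorted list
    obtain ⟨hpm, as, bs, hdecomp, hfail⟩ := List.find?_eq_some_iff_append.1 hfind
    have hm_sl : m ∈ sl := by rw [hdecomp]; simp
    have hm_cols : m ∈ cols := (PySem.List.mem_sorted _ _ _ _).1 hm_sl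
    have hm_filter : m ∈ cols.filter p := List.mem_filter.2 ⟨hm_cols, hpm⟩
    have hne : cols.filter p ≠ [] := fun h => by simp [h] at hm_filter
    rcases hmax : PySem.List.max? (cols.filter p) key with _ | m'
    · exact absurd ((PySem.List.max?_eq_none_iff _ _).1 hmax) hne
    have hm'_filter : m' ∈ cols.filter p := PySem.List.max?_mem hmax
    have hpm' : p m' = true := (List.mem_filter.1 hm'_filter).2
    have hle1 : key m ≤ key m' := PySem.List.max?_isMax hmax m hm_filter
    -- m' also occurs in the sorted list; being at/after m it has key ≤ key m
    have hm'_sl : m' ∈ sl := (PySem.List.mem_sorted _ _ _ _).2 (List.mem_filter.1 hm'_filter).1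
    have hpw : sl.Pairwise (fun a b => key b ≤ key a) := PySem.List.sorted_pairwise_rev cols key
    have hle2 : key m' ≤ key m := by
      rw [hdecomp] at hm'_sl hpw
      rcases List.mem_append.1 hm'_sl with h | h
      · exact absurd hpm' (by simpa using hfail m' h)
      · rcases List.mem_cons.1 h with h | h
        · exact le_of_eq (by rw [h])
        · exact (List.pairwise_cons.1 (List.pairwise_append.1 hpw).2.1).1 m' h
    have heq : m = m' := by
      apply pvCol_eq ((PySem.Chars.startswith_iff _ _).1 hpm) ((PySem.Chars.startswith_iff _ _).1 hpm')
      exact le_antisymm hle1 hle2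
    subst heq
    -- same column: replace(prefix,"",1) = drop = the slice
    have hdrop : pvReplaceFirst rem (m.toList ++ ['_']) [] = rem.drop (m.toList.length + 1) := by
      rw [pvReplaceFirst_of_prefix rem _ ((PySem.Chars.startswith_iff _ _).1 hpm)]
      simp
    have hslice : PySem.List.slice rem (some ((m.toList.length : Int) + 1)) none
        = rem.drop (m.toList.length + 1) := by
      rw [show ((m.toList.length : Int) + 1) = ((m.toList.length + 1 : Nat) : Int) by push_cast; ring]
      exact PySem.List.slice_from_natCast rem _
    simp only [String.length_toList] at hdrop hslice
    simp [hdrop, hslice]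

-- ===== VERDICT (by name: the statement is the Claim_ definition above) =====
theorem parse_feature_name_spec : Claim_equal_parse_feature_name := by
  intro raw cols _
  show parse_feature_name raw cols = parse_feature_name_alt raw cols
  unfold parse_feature_name parse_feature_name_alt
  by_cases h1 : PySem.Str.startswith raw "num__" = true
  · -- num__ branch: replace("num__","",1) = drop 5 = the slice [5:]
    have hpre : "num__".toList <+: raw.toList := by
      have := (PySem.Chars.startswith_iff raw.toList "num__".toList).1 (by simpa using h1)
      exact this
    rw [if_pos h1, if_pos h1, pvReplaceFirst_of_prefix _ _ hpre]
    have : PySem.List.slice raw.toList (some 5) none = raw.toList.drop 5 := by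
      rw [show (5 : Int) = ((5 : Nat) : Int) by norm_num]
      exact PySem.List.slice_from_natCast raw.toList 5
    simp [this]
  · rw [if_neg h1, if_neg h1]
    by_cases h2 : PySem.Str.startswith raw "cat__" = true
    · have hpre : "cat__".toList <+: raw.toList := by
        have := (PySem.Chars.startswith_iff raw.toList "cat__".toList).1 (by simpa using h2)
        exact this
      rw [if_pos h2, if_pos h2, pvReplaceFirst_of_prefix _ _ hpre]
      have hsl : PySem.List.slice raw.toList (some 5) none = raw.toList.drop 5 := by
        rw [show (5 : Int) = ((5 : Nat) : Int) by norm_num]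
        exact PySem.List.slice_from_natCast raw.toList 5
      rw [hsl]
      exact pvPick_eq (raw.toList.drop 5) cols
    · rw [if_neg h2, if_neg h2]
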